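-- pv_equiv track=rewrite | github.com/Sql-generation/query_generator | query_generation/helper_funcs/helper_funcs.py | get_table_name_from_column
-- ===== SOURCE A (Python) =====
-- def get_table_name_from_column(column, schema):
--     """
--     Get the table name(s) associated with a given column in the schema.
--
--     Args:
--         column (str): Column name.
--         schema (dict): Dictionary containing the schema information.
--
--     Returns:
--         list: List of table names associated with the column.
--
--     Examples:
--         >>> schema = {
--         ...     "table1": ["col1", "col2"],
--         ...     "table2": ["col3", "col4"]
--         ... }
--         >>> get_table_name_from_column("col1", schema)
--         ['table1']
--
--         >>> get_table_name_from_column("table2.col3", schema)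
--         ['table2']
--     """
--     tables = []
--     col = column
--     if column.find(".") != -1:
--         tables.append(column.split(".")[0])
--         col = column.split(".")[1]
--
--     for table in schema:
--         if col in schema[table] and table not in tables:
--             tables.append(table)
--     return tables
-- ===== SOURCE B (Python) =====
-- def get_table_name_from_column(column, schema):
--     tables = []
--     col = column
--     if column.find(".") != -1:
--         parts = column.split(".")
--         tables.append(parts[0])
--         col = parts[1]
--     index = {}
--     for table, cols in schema.items():
--         for c in cols:
--             index.setdefault(c, []).append(table)
--     for table in index.get(col, []):
--         if table not in tables:
--             tables.append(table)
--     return tables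
-- ===== Notes on version B (the rewrite author's own statement) =====
-- stated objective: alternative
-- what changed: B builds an inverted index (column -> list of tables) over the whole schema once and answers by a single dict lookup followed by an order-preserving dedup against the prefix table, instead of A's per-table membership test inside the schema scan.
import Mathlib
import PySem

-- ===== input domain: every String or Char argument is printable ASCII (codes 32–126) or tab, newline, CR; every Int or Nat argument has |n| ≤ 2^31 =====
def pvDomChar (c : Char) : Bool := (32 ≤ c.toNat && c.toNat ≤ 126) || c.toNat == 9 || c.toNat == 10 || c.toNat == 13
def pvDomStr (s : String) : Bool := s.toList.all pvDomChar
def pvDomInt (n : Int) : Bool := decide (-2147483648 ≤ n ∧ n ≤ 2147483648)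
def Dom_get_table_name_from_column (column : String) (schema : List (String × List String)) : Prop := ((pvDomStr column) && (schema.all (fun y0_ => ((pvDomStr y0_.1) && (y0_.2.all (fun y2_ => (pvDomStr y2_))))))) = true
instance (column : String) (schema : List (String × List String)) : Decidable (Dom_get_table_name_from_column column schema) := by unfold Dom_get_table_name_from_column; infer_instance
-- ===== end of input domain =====

-- B replaces A's per-table membership test by an inverted index (column → tables in schema order)
-- built once, then a single lookup with order-preserving dedup against the prefix table; alternative
-- decomposition, not claimed faster. Equivalence of RETURN values on schemas with distinct table keys.


-- ===== PORT A =====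
-- literal port: parse the optional "table." prefix, then `for table in schema: if col in
-- schema[table] and table not in tables: tables.append(table)`; `schema[table]` is the dict
-- lookup (first match under the assoc-list convention).
def get_table_name_from_column (column : String) (schema : List (String × List String)) : List String :=
  let tables : List String := []
  let col : String := column
  let (tables, col) :=
    if PySem.Str.find column "." ≠ -1 then
      (tables ++ [PySem.List.pyGetD ((PySem.Str.split? column ".").getD []) 0 ""],
       PySem.List.pyGetD ((PySem.Str.split? column ".").getD []) 1 "")
    else (tables, col)
  schema.foldl
    (fun tables p =>
      if col ∈ (PySem.Dict.mk schema).getD p.1 [] ∧ p.1 ∉ tables then tables ++ [p.1] else tables)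
    tables

-- ===== PORT B =====
-- port of Source B: same prefix parse; build the inverted index column → tables with
-- setdefault/append (= Dict.modify with default []); answer = lookup deduped against the prefix.
def get_table_name_from_column_alt (column : String) (schema : List (String × List String)) : List String :=
  let (tables, col) :=
    if PySem.Str.find column "." ≠ -1 then
      ([PySem.List.pyGetD ((PySem.Str.split? column ".").getD []) 0 ""],
       PySem.List.pyGetD ((PySem.Str.split? column ".").getD []) 1 "")
    else (([] : List String), column)
  let index : PySem.Dict String (List String) :=
    schema.foldl (fun d p => p.2.foldl (fun d c => d.modify c [] (· ++ [p.1])) d) PySem.Dict.empty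
  (index.getD col []).foldl (fun tables t => if t ∉ tables then tables ++ [t] else tables) tables

-- ===== PRECONDITION & SPEC =====
-- Pre_ excludes schemas whose association list repeats a table key: a Python dict cannot hold
-- duplicate keys (later entries silently overwrite), so behaviour there is an artefact of the
-- assoc-list representation, not of A.
def Pre_get_table_name_from_column (column : String) (schema : List (String × List String)) : Prop :=
  (schema.map Prod.fst).Nodup

instance (column : String) (schema : List (String × List String)) : Decidable (Pre_get_table_name_from_column column schema) := by unfold Pre_get_table_name_from_column; infer_instance

def pvWitness_get_table_name_from_column : String × (List (String × List String)) :=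
  ("table2.col3", [("table1", ["col1", "col2"]), ("table2", ["col3", "col4"])])

def Spec_get_table_name_from_column (column : String) (schema : List (String × List String)) (out : List String) : Prop := out = get_table_name_from_column_alt column schema
instance (column : String) (schema : List (String × List String)) (out : List String) : Decidable (Spec_get_table_name_from_column column schema out) := by unfold Spec_get_table_name_from_column; infer_instance

-- ===== CLAIM (what is proved, stated in full; the proofs are below) =====
def Claim_equal_get_table_name_from_column : Prop := ∀ (column : String) (schema : List (String × List String)), Dom_get_table_name_from_column column schema → Pre_get_table_name_from_column column schema → Spec_get_table_name_from_column column schema (get_table_name_from_column column schema)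

-- ===== LEMMAS AND PROOFS =====

-- the tables holding `col`, in schema order, one entry per occurrence of `col` in the column list
def pvInv (col : String) (schema : List (String × List String)) : List String :=
  schema.flatMap (fun p => (p.2.filter (fun c => c == col)).map (fun _ => p.1))

-- order-preserving dedup-append fold (B's final loop)
def pvDed (init l : List String) : List String :=
  l.foldl (fun tables t => if t ∉ tables then tables ++ [t] else tables) init

theorem pvDed_append (init l₁ l₂ : List String) :
    pvDed init (l₁ ++ l₂) = pvDed (pvDed init l₁) l₂ := by
  simp [pvDed, List.foldl_append]

theorem pvDed_const_mem {α : Type} (l : List α) (t : String) (init : List String)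
    (h : t ∈ init) : pvDed init (l.map (fun _ => t)) = init := by
  induction l with
  | nil => rfl
  | cons a l ih =>
    show pvDed (if t ∉ init then init ++ [t] else init) (l.map fun _ => t) = init
    rw [if_neg (by simp [h])]
    exact ih

theorem pvDed_const {α : Type} (m : List α) (t : String) (init : List String) :
    pvDed init (m.map (fun _ => t)) = if m ≠ [] ∧ t ∉ init then init ++ [t] else init := by
  cases m with
  | nil => simp [pvDed]
  | cons a m =>
    by_cases h : t ∈ init
    · rw [pvDed_const_mem (a :: m) t init h]; simp [h]
    · show pvDed (if t ∉ init then init ++ [t] else init) (m.map fun _ => t) = _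
      rw [if_pos h, pvDed_const_mem m t (init ++ [t]) (by simp)]
      simp [h]

theorem pvInv_getD (col : String) (schema : List (String × List String))
    (d : PySem.Dict String (List String)) :
    (schema.foldl (fun d p => p.2.foldl (fun d c => d.modify c [] (· ++ [p.1])) d) d).getD col []
      = d.getD col [] ++ pvInv col schema := by
  induction schema generalizing d with
  | nil => simp [pvInv]
  | cons p rest ih =>
    rw [List.foldl_cons, ih]
    have h1 : p.2.foldl (fun d c => d.modify c [] (· ++ [p.1])) d
        = (p.2.map (fun c => (c, p.1))).foldl (fun d q => d.modify q.1 [] (· ++ [q.2])) d := by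
      rw [List.foldl_map]
    rw [h1, PySem.Dict.getD_foldl_modify_append]
    simp [pvInv, List.filter_map, Function.comp_def, List.map_map]

theorem pvFold_eq_ded (col : String) (l : List (String × List String)) (tables : List String) :
    l.foldl (fun tables p => if col ∈ p.2 ∧ p.1 ∉ tables then tables ++ [p.1] else tables) tables
      = pvDed tables (pvInv col l) := by
  induction l generalizing tables with
  | nil => rfl
  | cons p rest ih =>
    have hfirst : pvDed tables ((p.2.filter (fun c => c == col)).map (fun _ => p.1))
        = if col ∈ p.2 ∧ p.1 ∉ tables then tables ++ [p.1] else tables := by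
      rw [pvDed_const]
      have : (p.2.filter (fun c => c == col) ≠ []) ↔ col ∈ p.2 := by
        rw [Ne, List.filter_eq_nil_iff]
        simp
      by_cases hc : col ∈ p.2 <;> by_cases ht : p.1 ∈ tables <;> simp [this, hc, ht]
    rw [List.foldl_cons, ih]
    show _ = pvDed tables ((p.2.filter (fun c => c == col)).map (fun _ => p.1) ++ pvInv col rest)
    rw [pvDed_append, hfirst]

-- under Nodup keys, the dict lookup for a listed table is that table's own column list
theorem pvLookup_eq (schema : List (String × List String))
    (hnd : (schema.map Prod.fst).Nodup) {p : String × List String} (hp : p ∈ schema) :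
    (PySem.Dict.mk schema).getD p.1 [] = p.2 :=
  PySem.Dict.getD_of_mem_items (d := PySem.Dict.mk schema) hp hnd []

-- under Nodup keys, A's scan equals B's lookup-then-dedup, for any common start state
theorem pvMain (col : String) (schema : List (String × List String))
    (hpre : (schema.map Prod.fst).Nodup) (tables : List String) :
    schema.foldl
      (fun tables p =>
        if col ∈ (PySem.Dict.mk schema).getD p.1 [] ∧ p.1 ∉ tables then tables ++ [p.1] else tables)
      tables
    = ((schema.foldl (fun d p => p.2.foldl (fun d c => d.modify c [] (· ++ [p.1])) d)
          PySem.Dict.empty).getD col []).foldl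
        (fun tables t => if t ∉ tables then tables ++ [t] else tables) tables := by
  rw [pvInv_getD]
  rw [PySem.List.foldl_congr_mem (l := schema) (init := tables)
        (f := fun tables p =>
          if col ∈ (PySem.Dict.mk schema).getD p.1 [] ∧ p.1 ∉ tables then tables ++ [p.1] else tables)
        (g := fun tables p => if col ∈ p.2 ∧ p.1 ∉ tables then tables ++ [p.1] else tables)
        (fun tables p hp => by simp only [pvLookup_eq schema hpre hp])]
  rw [pvFold_eq_ded]
  simp [pvDed, PySem.Dict.getD_empty]

-- ===== VERDICT (by name: the statement is the Claim_ definition above) =====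
theorem get_table_name_from_column_spec : Claim_equal_get_table_name_from_column := by
  intro column schema _ hpre
  unfold Spec_get_table_name_from_column
  unfold get_table_name_from_column get_table_name_from_column_alt
  by_cases hdot : PySem.Str.find column "." ≠ -1
  · simp only [if_pos hdot, List.nil_append]
    exact pvMain _ schema hpre _
  · simp only [if_neg hdot]
    exact pvMain _ schema hpre _
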